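-- pv_equiv track=rewrite | github.com/Austin-High-AP-CS-Principles/11-2-public-private-key-fwilson12 | main.py | pick_e_d
-- ===== SOURCE A (Python) =====
-- def gcd(p,q):
--     while q != 0:
--         p, q = q, p%q
--     return p
--
-- def is_coprime(x, y):
--     return gcd(x, y) == 1
--
-- def calc_N(e, q):
-- 	N = e * q
-- 	return N
--
-- def calc_T(p, q):
-- 	T = (p-1)*(q-1)
-- 	return T
--
-- def pick_e_d(p, q):
-- 	N = calc_N(p,q)
-- 	T = calc_T(p,q)
-- 	e = 0
-- 	for i in range(T):
-- 		if is_coprime(i, T) == True and is_coprime(i, N) == True and i < T: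
-- 			e = i
-- 	i = 0
-- 	d = 0
-- 	running = True
-- 	while running == True:
-- 		if (e * i) % T == 1 and i != e:
-- 			d = i
-- 			running = False
-- 		else:
-- 			i += 1
-- 	return e, d
-- ===== SOURCE B (Python) =====
-- def _gcd(a, b):
--     return a if b == 0 else _gcd(b, a % b)
--
-- def pick_e_d(p, q):
--     N = p * q
--     T = (p - 1) * (q - 1)
--     # e: largest i in [1, T) coprime to both T and N, found by downward early-exit scan
--     e = 0
--     i = T - 1
--     while i > 0:
--         if _gcd(i, T) == 1 and _gcd(i, N) == 1:
--             e = i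
--             break
--         i -= 1
--     # d: modular inverse of e mod T via extended Euclid (tracking only the s-coefficient),
--     # bumped by T when the inverse coincides with e itself
--     old_r, r = e, T
--     old_s, s = 1, 0
--     while r != 0:
--         qt = old_r // r
--         old_r, r = r, old_r - qt * r
--         old_s, s = s, old_s - qt * s
--     d = old_s % T
--     if d == e:
--         d += T
--     return e, d
-- ===== Notes on version B (the rewrite author's own statement) =====
-- stated objective: faster
-- what changed: e is found by a downward early-exit scan from T-1 instead of folding over all of range(T), and d is computed by the extended Euclidean algorithm (modular inverse, bumped by T when it equals e) instead of a linear search from 0.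
import Mathlib
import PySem

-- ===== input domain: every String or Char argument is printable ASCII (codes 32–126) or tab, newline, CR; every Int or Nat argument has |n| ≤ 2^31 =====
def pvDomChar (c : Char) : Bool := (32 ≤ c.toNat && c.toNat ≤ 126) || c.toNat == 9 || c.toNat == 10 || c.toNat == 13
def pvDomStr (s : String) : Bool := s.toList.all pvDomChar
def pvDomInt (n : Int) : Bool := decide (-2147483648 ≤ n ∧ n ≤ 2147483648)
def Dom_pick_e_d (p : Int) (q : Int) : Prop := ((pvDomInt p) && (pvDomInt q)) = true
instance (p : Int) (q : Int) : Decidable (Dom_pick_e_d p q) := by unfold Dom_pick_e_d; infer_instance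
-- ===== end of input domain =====

-- B finds e by a downward early-exit scan instead of a full fold over range(T), and computes d
-- by the extended Euclidean algorithm instead of a linear search; measured faster (objective: faster).

-- ===== PORT A =====
-- gcd: while q != 0: p, q = q, p % q  (fuel |q|+1 is a totality guard: |q| strictly decreases)
def pvGcdLoopA : Nat → Int → Int → Int
  | 0, p, _ => p
  | f+1, p, q => if q ≠ 0 then pvGcdLoopA f q (PySem.Int.mod p q) else p

def pvGcdA (p q : Int) : Int := pvGcdLoopA (q.natAbs + 1) p q

-- while running: if (e*i) % T == 1 and i != e: d = i; running = False; else i += 1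
-- (fuel is a totality guard only: under Pre_ the hit is below 2*T, so fuel 2*T+2 never runs out)
def pvDLoopA : Nat → Int → Int → Int → Int
  | 0, _, _, _ => 0
  | f+1, e, T, i => if PySem.Int.mod (e*i) T == 1 && i != e then i else pvDLoopA f e T (i+1)

def pick_e_d (p : Int) (q : Int) : List Int :=
  let N := p * q
  let T := (p-1) * (q-1)
  let e := (PySem.List.pyRange 0 T 1).foldl
    (fun e i => if pvGcdA i T == 1 && pvGcdA i N == 1 && decide (i < T) then i else e) 0
  let d := pvDLoopA ((2*T).toNat + 2) e T 0
  [e, d]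

-- ===== PORT B =====
-- def _gcd(a, b): return a if b == 0 else _gcd(b, a % b)  (fuel |b|+1 is a totality guard)
def pvGcdLoopB : Nat → Int → Int → Int
  | 0, a, _ => a
  | f+1, a, b => if b == 0 then a else pvGcdLoopB f b (PySem.Int.mod a b)

def pvGcdB (a b : Int) : Int := pvGcdLoopB (b.natAbs + 1) a b

-- i = T-1; while i > 0: if both coprime: e = i; break; i -= 1  (fuel = number of loop entries)
def pvEScanB : Nat → Int → Int → Int → Int
  | 0, _, _, _ => 0
  | f+1, i, T, N =>
    if i > 0 then (if pvGcdB i T == 1 && pvGcdB i N == 1 then i else pvEScanB f (i-1) T N) else 0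

-- extended Euclid on (old_r, r, old_s, s); while r != 0  (fuel |r|+1 is a totality guard)
def pvEgcdB : Nat → Int → Int → Int → Int → Int × Int
  | 0, oldr, _, olds, _ => (oldr, olds)
  | f+1, oldr, r, olds, s =>
    if r ≠ 0 then
      pvEgcdB f r (oldr - PySem.Int.floordiv oldr r * r) s (olds - PySem.Int.floordiv oldr r * s)
    else (oldr, olds)

def pick_e_d_alt (p : Int) (q : Int) : List Int :=
  let N := p * q
  let T := (p-1) * (q-1)
  let e := pvEScanB ((T-1).toNat + 1) (T-1) T N
  let gs := pvEgcdB (T.natAbs + 1) e T 1 0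
  let d0 := PySem.Int.mod gs.2 T
  [e, if d0 == e then d0 + T else d0]


-- ===== PRECONDITION & SPEC =====
-- Pre_ is exactly where the Python A returns: for T = (p-1)*(q-1), A raises ZeroDivisionError
-- when T = 0 and its final while-loop never terminates when T < 0 or T = 1.
def Pre_pick_e_d (p : Int) (q : Int) : Prop := 2 ≤ (p-1) * (q-1)
instance (p : Int) (q : Int) : Decidable (Pre_pick_e_d p q) := by unfold Pre_pick_e_d; infer_instance
def pvWitness_pick_e_d : Int × Int := (3, 5)

def Spec_pick_e_d (p : Int) (q : Int) (out : List Int) : Prop := out = pick_e_d_alt p q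
instance (p : Int) (q : Int) (out : List Int) : Decidable (Spec_pick_e_d p q out) := by unfold Spec_pick_e_d; infer_instance

-- ===== CLAIM (what is proved, stated in full; the proofs are below) =====
def Claim_equal_pick_e_d : Prop := ∀ (p : Int) (q : Int), Dom_pick_e_d p q → Pre_pick_e_d p q → Spec_pick_e_d p q (pick_e_d p q)

-- ===== LEMMAS AND PROOFS =====

theorem pvGcd_loops_eq (f : Nat) (a b : Int) : pvGcdLoopA f a b = pvGcdLoopB f a b := by
  induction f generalizing a b with
  | zero => rfl
  | succ f ih =>
    simp only [pvGcdLoopA, pvGcdLoopB]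
    by_cases h : b = 0 <;> simp [h, ih]

theorem pvGcdA_eq_B (a b : Int) : pvGcdA a b = pvGcdB a b := pvGcd_loops_eq _ a b

theorem pvGcdLoopA_eq_gcd (f : Nat) (a b : Int) (ha : 0 ≤ a) (hb : 0 ≤ b)
    (hf : b.natAbs < f) : pvGcdLoopA f a b = Int.gcd a b := by
  induction f generalizing a b with
  | zero => omega
  | succ f ih =>
    by_cases hb0 : b = 0
    · simp [pvGcdLoopA, hb0, Int.natAbs_of_nonneg ha]
    · have hbpos : 0 < b := lt_of_le_of_ne hb (Ne.symm hb0)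
      have hmod : PySem.Int.mod a b = a % b := PySem.Int.mod_eq_emod_of_pos hbpos
      have h0 : 0 ≤ a % b := Int.emod_nonneg a hb0
      have h1 : a % b < b := Int.emod_lt_of_pos a hbpos
      simp only [pvGcdLoopA, hb0, if_pos, ne_eq, not_false_iff, hmod]
      rw [ih b (a % b) hb h0 (by omega)]
      rw [Int.gcd_comm, Int.gcd_emod]

theorem pvGcdA_eq_gcd (a b : Int) (ha : 0 ≤ a) (hb : 0 ≤ b) : pvGcdA a b = Int.gcd a b :=
  pvGcdLoopA_eq_gcd _ a b ha hb (Nat.lt_succ_self _)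

theorem pre_N_nonneg (p q : Int) (h : 2 ≤ (p-1) * (q-1)) : 0 ≤ p * q := by
  by_cases hp : 0 ≤ p <;> by_cases hq : 0 ≤ q
  · positivity
  · push_neg at hq
    rcases eq_or_lt_of_le hp with hp0 | hp1
    · nlinarith
    · nlinarith
  · push_neg at hp
    rcases eq_or_lt_of_le hq with hq0 | hq1
    · nlinarith
    · nlinarith
  · push_neg at hp hq; nlinarith

theorem fold_eq_scan (T N : Int) (f n : Nat) (hfn : n ≤ f) (hnT : (n : Int) ≤ T) :
    (PySem.List.pyRange 0 (n : Int) 1).foldl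
      (fun e i => if pvGcdA i T == 1 && pvGcdA i N == 1 && decide (i < T) then i else e) 0
    = pvEScanB f ((n : Int) - 1) T N := by
  induction n generalizing f with
  | zero =>
    cases f <;> simp [pvEScanB, PySem.List.pyRange_one_eq_nil (le_refl (0:Int))]
  | succ n ih =>
    cases f with
    | zero => omega
    | succ f =>
      have hcast : ((n+1 : Nat) : Int) = (n : Int) + 1 := by push_cast; ring
      rw [hcast, PySem.List.pyRange_one_succ_right (by positivity), List.foldl_append]
      simp only [List.foldl_cons, List.foldl_nil, pvEScanB]
      have hsub : (n : Int) + 1 - 1 = (n : Int) := by ring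
      rw [hsub]
      cases n with
      | zero =>
        simp
      | succ m =>
        have hpos : ((m+1 : Nat) : Int) > 0 := by positivity
        rw [if_pos hpos]
        have hlt : (((m+1 : Nat) : Int) < T) := by push_cast at hnT ⊢; omega
        have hAB : ∀ x, pvGcdA ((m+1 : Nat) : Int) x = pvGcdB ((m+1 : Nat) : Int) x :=
          fun x => pvGcdA_eq_B _ x
        rw [hAB T, hAB N]
        rw [decide_eq_true hlt]
        simp only [Bool.and_true]
        by_cases hc : (pvGcdB ((m+1 : Nat) : Int) T == 1 && pvGcdB ((m+1 : Nat) : Int) N == 1) = true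
        · rw [if_pos hc, if_pos hc]
        · rw [if_neg hc, if_neg hc]
          have : ((m+1 : Nat) : Int) - 1 = ((m : Nat) : Int) + 1 - 1 := by push_cast; ring
          rw [← ih f (by omega) (by push_cast at hnT ⊢; omega)]

theorem fold_props (T N : Int) (n : Nat) (h2 : 2 ≤ n) (hnT : (n : Int) ≤ T) (hT : 2 ≤ T)
    (hN : 0 ≤ N) :
    1 ≤ (PySem.List.pyRange 0 (n : Int) 1).foldl
        (fun e i => if pvGcdA i T == 1 && pvGcdA i N == 1 && decide (i < T) then i else e) 0
    ∧ (PySem.List.pyRange 0 (n : Int) 1).foldl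
        (fun e i => if pvGcdA i T == 1 && pvGcdA i N == 1 && decide (i < T) then i else e) 0 < T
    ∧ Int.gcd ((PySem.List.pyRange 0 (n : Int) 1).foldl
        (fun e i => if pvGcdA i T == 1 && pvGcdA i N == 1 && decide (i < T) then i else e) 0) T = 1 := by
  induction n, h2 using Nat.le_induction with
  | base =>
    have hr : PySem.List.pyRange 0 ((2:Nat) : Int) 1 = [0, 1] := by decide
    rw [hr]
    simp only [List.foldl_cons, List.foldl_nil]
    have hg0 : pvGcdA 0 T = Int.gcd 0 T := pvGcdA_eq_gcd 0 T le_rfl (by omega)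
    have hg0' : ¬ ((pvGcdA 0 T == 1) = true) := by
      rw [hg0]
      simp only [Int.gcd_zero_left, beq_iff_eq]
      omega
    have hb0 : (pvGcdA 0 T == 1 && pvGcdA 0 N == 1 && decide ((0:Int) < T)) = false := by
      cases h : (pvGcdA 0 T == 1) with
      | false => simp [h]
      | true => exact absurd h hg0'
    rw [hb0]
    have hg1T : pvGcdA 1 T = Int.gcd 1 T := pvGcdA_eq_gcd 1 T (by omega) (by omega)
    have hg1N : pvGcdA 1 N = Int.gcd 1 N := pvGcdA_eq_gcd 1 N (by omega) hN
    have hb1 : (pvGcdA 1 T == 1 && pvGcdA 1 N == 1 && decide ((1:Int) < T)) = true := by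
      rw [hg1T, hg1N]
      simp only [Int.gcd_one_left, Bool.and_eq_true, beq_iff_eq, decide_eq_true_eq]
      refine ⟨⟨rfl, rfl⟩, by omega⟩
    simp only [Bool.false_eq_true, if_false, hb1, if_true]
    refine ⟨le_refl 1, by omega, by simp [Int.gcd_one_left]⟩
  | succ n hn ih =>
    have hcast : ((n+1 : Nat) : Int) = (n : Int) + 1 := by push_cast; ring
    rw [hcast, PySem.List.pyRange_one_succ_right (by positivity), List.foldl_append]
    simp only [List.foldl_cons, List.foldl_nil]
    have hnT' : (n : Int) ≤ T := by omega
    by_cases hc : (pvGcdA (n:Int) T == 1 && pvGcdA (n:Int) N == 1 && decide ((n:Int) < T)) = true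
    · rw [if_pos hc]
      have hgT : pvGcdA (n:Int) T = Int.gcd (n:Int) T := pvGcdA_eq_gcd _ T (by positivity) (by omega)
      simp only [Bool.and_eq_true, beq_iff_eq] at hc
      refine ⟨by exact_mod_cast Nat.one_le_iff_ne_zero.mpr (by omega), by omega, ?_⟩
      have := hc.1.1
      rw [hgT] at this
      exact_mod_cast this
    · rw [if_neg hc]
      exact ih hnT'

theorem egcd_inv (f : Nat) (e T : Int) : ∀ (oldr r olds s : Int), 0 ≤ oldr → 0 ≤ r →
    r.natAbs < f → T ∣ e * olds - oldr → T ∣ e * s - r →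
    (pvEgcdB f oldr r olds s).1 = Int.gcd oldr r
    ∧ T ∣ e * (pvEgcdB f oldr r olds s).2 - (pvEgcdB f oldr r olds s).1 := by
  induction f with
  | zero => intro oldr r olds s _ _ hf; omega
  | succ f ih =>
    intro oldr r olds s hor hr hf h1 h2
    by_cases hr0 : r = 0
    · simp only [pvEgcdB, hr0, ne_eq, not_true_eq_false, if_false]
      constructor
      · simp [Int.gcd_zero_right, Int.natAbs_of_nonneg hor]
      · exact h1
    · have hrpos : 0 < r := lt_of_le_of_ne hr (Ne.symm hr0)
      have hfd : PySem.Int.floordiv oldr r * r + PySem.Int.mod oldr r = oldr :=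
        PySem.Int.floordiv_mul_add_mod oldr r
      have hsub : oldr - PySem.Int.floordiv oldr r * r = PySem.Int.mod oldr r := by linarith
      have hm0 : 0 ≤ PySem.Int.mod oldr r := PySem.Int.mod_nonneg oldr hrpos
      have hm1 : PySem.Int.mod oldr r < r := PySem.Int.mod_lt oldr hrpos
      simp only [pvEgcdB, hr0, ne_eq, not_false_iff, if_true]
      have hd1 : T ∣ e * (olds - PySem.Int.floordiv oldr r * s)
          - (oldr - PySem.Int.floordiv oldr r * r) := by
        have : e * (olds - PySem.Int.floordiv oldr r * s)
            - (oldr - PySem.Int.floordiv oldr r * r)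
            = (e * olds - oldr) - PySem.Int.floordiv oldr r * (e * s - r) := by ring
        rw [this]
        exact dvd_sub h1 (Dvd.dvd.mul_left h2 _)
      obtain ⟨hg, hd⟩ := ih r (oldr - PySem.Int.floordiv oldr r * r) s
        (olds - PySem.Int.floordiv oldr r * s) hr (by rw [hsub]; exact hm0)
        (by rw [hsub]; omega) h2 hd1
      refine ⟨?_, hd⟩
      rw [hg, hsub, PySem.Int.mod_eq_emod_of_pos hrpos, Int.gcd_comm, Int.gcd_emod]

theorem dloop_finds (e T : Int) (f : Nat) : ∀ (i j : Int), i ≤ j →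
    (PySem.Int.mod (e*j) T = 1 ∧ j ≠ e) →
    (∀ k, i ≤ k → k < j → ¬(PySem.Int.mod (e*k) T = 1 ∧ k ≠ e)) →
    (j - i).toNat < f → pvDLoopA f e T i = j := by
  induction f with
  | zero => intro i j hij _ _ hf; omega
  | succ f ih =>
    intro i j hij hQ hmin hf
    rcases eq_or_lt_of_le hij with heq | hlt
    · subst heq
      simp only [pvDLoopA]
      rw [if_pos]
      simp only [Bool.and_eq_true, beq_iff_eq, bne_iff_ne]
      exact ⟨hQ.1, hQ.2⟩
    · have hni : ¬(PySem.Int.mod (e*i) T = 1 ∧ i ≠ e) := hmin i le_rfl hlt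
      simp only [pvDLoopA]
      rw [if_neg]
      · exact ih (i+1) j (by omega) hQ (fun k hk1 hk2 => hmin k (by omega) hk2) (by omega)
      · simp only [Bool.and_eq_true, beq_iff_eq, bne_iff_ne]
        exact hni


theorem main_eq (p q : Int) (hpre : 2 ≤ (p-1) * (q-1)) :
    pick_e_d p q = pick_e_d_alt p q := by
  have hN : 0 ≤ p * q := pre_N_nonneg p q hpre
  simp only [pick_e_d, pick_e_d_alt]
  set T := (p-1) * (q-1) with hTdef
  set N := p * q with hNdef
  have hT : 2 ≤ T := hpre
  have hn : ((T.toNat : Nat) : Int) = T := Int.toNat_of_nonneg (by omega)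
  set e := (PySem.List.pyRange 0 T 1).foldl
      (fun e i => if pvGcdA i T == 1 && pvGcdA i N == 1 && decide (i < T) then i else e) 0 with hedef
  -- e agrees with B's downward scan
  have hescan : e = pvEScanB ((T-1).toNat + 1) (T-1) T N := by
    have h := fold_eq_scan T N ((T-1).toNat + 1) T.toNat (by omega) (by omega)
    rw [hn] at h
    rw [hedef, h]
  -- properties of e
  have hp := fold_props T N T.toNat (by omega) (by omega) hT hN
  rw [hn] at hp
  rw [← hedef] at hp
  obtain ⟨he1, heT, hgcd⟩ := hp
  have he0 : 0 ≤ e := by omega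
  -- extended Euclid invariant
  set gs := pvEgcdB (T.natAbs + 1) e T 1 0 with hgsdef
  obtain ⟨hg1, hdvd⟩ := egcd_inv (T.natAbs + 1) e T e T 1 0 he0 (by omega)
    (Nat.lt_succ_self _) (by simp) (by simp)
  rw [← hgsdef] at hg1 hdvd
  rw [hgcd] at hg1
  have hg1' : gs.1 = 1 := by exact_mod_cast hg1
  rw [hg1'] at hdvd
  set d0 := PySem.Int.mod gs.2 T with hd0def
  have hd00 : 0 ≤ d0 := PySem.Int.mod_nonneg gs.2 (by omega)
  have hd0T : d0 < T := PySem.Int.mod_lt gs.2 (by omega)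
  -- e * d0 ≡ 1 (mod T)
  have hsubdvd : T ∣ gs.2 - d0 := by
    have hfd : PySem.Int.floordiv gs.2 T * T + PySem.Int.mod gs.2 T = gs.2 :=
      PySem.Int.floordiv_mul_add_mod gs.2 T
    exact ⟨PySem.Int.floordiv gs.2 T, by rw [mul_comm]; omega⟩
  have hmd : T ∣ e * d0 - 1 := by
    have h : e * d0 - 1 = (e * gs.2 - 1) - e * (gs.2 - d0) := by ring
    rw [h]
    exact dvd_sub hdvd (hsubdvd.mul_left e)
  have hd0mod : PySem.Int.mod (e * d0) T = 1 := by
    rw [PySem.Int.mod_eq_emod_of_pos (by omega : (0:Int) < T)]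
    have hmod : (e * d0) % T = 1 % T := Int.ModEq.eq (Int.modEq_iff_dvd.mpr (by
      have := (dvd_neg.mpr hmd)
      simpa [neg_sub] using this))
    rw [hmod, Int.emod_eq_of_lt (by omega) (by omega)]
  -- uniqueness of the inverse below d0 + T
  have huniq : ∀ k : Int, 0 ≤ k → k < d0 + T → PySem.Int.mod (e * k) T = 1 → k = d0 := by
    intro k hk0 hk1 hkm
    have hdk : T ∣ (d0 - k) * e := by
      have h1 : (e * k) % T = (e * d0) % T := by
        rw [← PySem.Int.mod_eq_emod_of_pos (by omega : (0:Int) < T),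
            ← PySem.Int.mod_eq_emod_of_pos (by omega : (0:Int) < T), hkm, hd0mod]
      have h2 : T ∣ e * d0 - e * k := Int.ModEq.dvd h1
      have h3 : e * d0 - e * k = (d0 - k) * e := by ring
      rw [← h3]; exact h2
    have hgc : Int.gcd T e = 1 := by rw [Int.gcd_comm]; exact hgcd
    have hdk2 : T ∣ d0 - k := Int.dvd_of_dvd_mul_left_of_gcd_one hdk hgc
    obtain ⟨m, hm⟩ := hdk2
    rcases lt_trichotomy m 0 with hm0 | hm0 | hm0
    · nlinarith
    · subst hm0; simp only [mul_zero] at hm; omega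
    · nlinarith
  -- the common value of d
  rw [← hescan, ← hgsdef, ← hd0def]
  have hd : pvDLoopA ((2*T).toNat + 2) e T 0
      = (if (d0 == e) = true then d0 + T else d0) := by
    by_cases hde : d0 = e
    · rw [if_pos (by exact beq_iff_eq.mpr hde)]
      apply dloop_finds e T ((2*T).toNat + 2) 0 (d0 + T) (by omega)
      · refine ⟨?_, by omega⟩
        rw [PySem.Int.mod_eq_emod_of_pos (by omega : (0:Int) < T)]
        have h : e * (d0 + T) = e * d0 + T * e := by ring
        rw [h, Int.add_mul_emod_self_left,
            ← PySem.Int.mod_eq_emod_of_pos (by omega : (0:Int) < T), hd0mod]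
      · intro k hk0 hk1 hQ
        have := huniq k hk0 (by omega) hQ.1
        exact hQ.2 (by omega)
      · omega
    · rw [if_neg (by simpa using hde)]
      apply dloop_finds e T ((2*T).toNat + 2) 0 d0 (by omega)
      · exact ⟨hd0mod, hde⟩
      · intro k hk0 hk1 hQ
        have := huniq k hk0 (by omega) hQ.1
        omega
      · omega
  rw [hd]

-- ===== VERDICT (by name: the statement is the Claim_ definition above) =====
theorem pick_e_d_spec : Claim_equal_pick_e_d := by
  intro p q _ hpre
  unfold Spec_pick_e_d
  exact main_eq p q hpre
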